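-- pv_equiv track=rewrite | github.com/HongBo0502/MonashProjects | FIT3155 - Advanced data structures and algorithms/Assignment2/q2/bwtzip.py | elias
-- ===== SOURCE A (Python) =====
-- def num_to_bitsStr(num,elias:bool=False,bit:int=0):
--     if elias==True:
--         bit_arr = ""
--         while num > 1:
--             bit_arr = str(num % 2) + bit_arr
--             num = num >> 1
--         bit_arr = "0"+bit_arr
--         return bit_arr
--     else:
--         bit_arr = ""
--         while num > 0:
--             bit_arr = str(num % 2) + bit_arr
--             num = num >> 1
--         if bit>0:
--             while len(bit_arr)<bit:
--                 bit_arr="0"+bit_arr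
--         return bit_arr
--
-- def elias(num):
--     """
--     elias encoder
--     """
--
--     # convert number into bits
--     bit_arr = num_to_bitsStr(num)
--
--     # get length of string and decrement by 1 for elias
--     length = len(bit_arr) - 1
--
--     # loop until the length is 0
--     while length > 0:
--         tmp_bit_array = num_to_bitsStr(length,True)   # convert value to reversed bit array
--         length = len(tmp_bit_array)-1             # update next length component
--         bit_arr = tmp_bit_array +bit_arr                   # append bit value to output
--
--     return bit_arr
-- ===== SOURCE B (Python) =====
-- def elias(num):
--     """elias encoder (recursive decomposition: binary by recursion, prefix chain by recursion)"""
--     binary = _bits(num)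
--     return _prefix(len(binary) - 1) + binary
--
-- def _bits(n):
--     """plain binary of n, '' for n <= 0"""
--     if n <= 0:
--         return ""
--     return _bits(n >> 1) + str(n & 1)
--
-- def _prefix(length):
--     if length <= 0:
--         return ""
--     code = "0" + _bits(length)[1:]
--     return _prefix(len(code) - 1) + code
-- ===== Notes on version B (the rewrite author's own statement) =====
-- stated objective: alternative
-- what changed: Replaced the iterative prepend-to-accumulator cascade (while loop recomputing each length component and gluing it on the front) by the standard recursive definition of the Elias prefix chain: a recursive helper builds each length code and recurses on its shorter length, and the binary expansion itself is computed by direct recursion instead of a while loop.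
import Mathlib
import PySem

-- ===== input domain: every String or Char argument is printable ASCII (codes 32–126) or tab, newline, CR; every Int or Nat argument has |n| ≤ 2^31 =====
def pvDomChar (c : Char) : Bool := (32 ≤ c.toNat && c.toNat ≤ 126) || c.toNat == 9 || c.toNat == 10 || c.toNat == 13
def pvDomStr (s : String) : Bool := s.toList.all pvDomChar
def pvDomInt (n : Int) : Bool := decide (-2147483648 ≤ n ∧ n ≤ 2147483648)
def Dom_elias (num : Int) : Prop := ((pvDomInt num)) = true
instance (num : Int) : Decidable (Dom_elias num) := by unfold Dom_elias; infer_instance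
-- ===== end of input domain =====

-- B replaces A's iterative prepend-to-accumulator Elias cascade by the standard recursive
-- decomposition (recursive binary expansion + recursive prefix chain); same cost, alternative structure.


-- ===== PORT A =====
-- facts cited by the ports' termination proofs (n >> 1 shrinks; one binary digit is one char)
theorem pvShiftr_toNat (n : Int) : (n >>> (1:Nat)).toNat = n.toNat / 2 := by
  rw [Int.shiftRight_eq_div_pow]; norm_num; omega

theorem pvDigit_len (n : Int) : (PySem.Int.toStr (PySem.Int.mod n 2)).toList.length = 1 := by
  have h0 := PySem.Int.mod_nonneg n (b := 2) (by norm_num)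
  have h1 := PySem.Int.mod_lt n (b := 2) (by norm_num)
  have : PySem.Int.mod n 2 = 0 ∨ PySem.Int.mod n 2 = 1 := by omega
  rcases this with h | h <;> rw [h] <;> decide

-- while num > 1: bit_arr = str(num % 2) + bit_arr; num = num >> 1   (then "0" + bit_arr outside)
def ntbLoopTrue (num : Int) (acc : String) : String :=
  if 1 < num then
    ntbLoopTrue (num >>> (1:Nat)) (PySem.Int.toStr (PySem.Int.mod num 2) ++ acc)
  else acc
termination_by num.toNat
decreasing_by rw [pvShiftr_toNat]; omega

-- while num > 0: bit_arr = str(num % 2) + bit_arr; num = num >> 1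
def ntbLoopFalse (num : Int) (acc : String) : String :=
  if 0 < num then
    ntbLoopFalse (num >>> (1:Nat)) (PySem.Int.toStr (PySem.Int.mod num 2) ++ acc)
  else acc
termination_by num.toNat
decreasing_by rw [pvShiftr_toNat]; omega

-- while len(bit_arr) < bit: bit_arr = "0" + bit_arr
def ntbPad (bitArr : String) (bit : Int) : String :=
  if PySem.Str.len bitArr < bit then ntbPad ("0" ++ bitArr) bit else bitArr
termination_by (bit - PySem.Str.len bitArr).toNat
decreasing_by
  have h1 : PySem.Str.len ("0" ++ bitArr) = PySem.Str.len "0" + PySem.Str.len bitArr :=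
    PySem.Str.len_append _ _
  have h2 : PySem.Str.len "0" = (1:Int) := by decide
  omega

def numToBitsStr (num : Int) (elias : Bool) (bit : Int) : String :=
  if elias = true then "0" ++ ntbLoopTrue num ""
  else
    let bitArr := ntbLoopFalse num ""
    if 0 < bit then ntbPad bitArr bit else bitArr

-- length bound cited by eliasLoop's termination: the elias bit string of n has between 1 and n chars
theorem pvLoopTrue_len (k : Nat) : ∀ (n : Int) (acc : String), n.toNat ≤ k →
    (ntbLoopTrue n acc).toList.length ≤ (n - 1).toNat + acc.toList.length := by
  induction k with
  | zero =>
    intro n acc hk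
    rw [ntbLoopTrue]
    have : ¬ 1 < n := by omega
    simp [this]
  | succ k ih =>
    intro n acc hk
    rw [ntbLoopTrue]
    by_cases h : 1 < n
    · simp only [h, if_true]
      have hm : (n >>> (1:Nat)).toNat ≤ k := by rw [pvShiftr_toNat]; omega
      have := ih (n >>> (1:Nat)) (PySem.Int.toStr (PySem.Int.mod n 2) ++ acc) hm
      rw [String.toList_append, List.length_append, pvDigit_len] at this
      have hs := pvShiftr_toNat n
      omega
    · simp [h]

theorem pvTmp_len_bounds (n : Int) (h : 1 ≤ n) :
    1 ≤ (numToBitsStr n true 0).toList.length ∧ (numToBitsStr n true 0).toList.length ≤ n.toNat := by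
  have hb := pvLoopTrue_len n.toNat n "" le_rfl
  have he : ("" : String).toList.length = 0 := by decide
  rw [he] at hb
  have h2 : (numToBitsStr n true 0).toList.length = 1 + (ntbLoopTrue n "").toList.length := by
    rw [numToBitsStr, if_pos rfl, String.toList_append]
    have h0 : ("0" : String).toList = ['0'] := by decide
    rw [h0]
    simp only [List.length_append, List.length_cons, List.length_nil]
  omega

-- while length > 0: tmp = num_to_bitsStr(length, True); length = len(tmp)-1; bit_arr = tmp + bit_arr
def eliasLoop (length : Int) (bitArr : String) : String :=
  if 0 < length then
    let tmp := numToBitsStr length true 0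
    eliasLoop (PySem.Str.len tmp - 1) (tmp ++ bitArr)
  else bitArr
termination_by length.toNat
decreasing_by
  have := pvTmp_len_bounds length (by omega)
  rw [PySem.Str.len_eq]
  omega

def elias (num : Int) : String :=
  let bitArr := numToBitsStr num false 0
  eliasLoop (PySem.Str.len bitArr - 1) bitArr

-- ===== PORT B =====
-- _bits(n): '' if n <= 0 else _bits(n >> 1) + str(n & 1)
def bitsB (n : Int) : String :=
  if n ≤ 0 then "" else bitsB (n >>> (1:Nat)) ++ PySem.Int.toStr (PySem.Int.band n 1)
termination_by n.toNat
decreasing_by rw [pvShiftr_toNat]; omega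

-- length bounds cited by prefixB's termination: 1 ≤ len(_bits n) ≤ n for n ≥ 1
theorem pvBits_len_le (k : Nat) : ∀ (n : Int), n.toNat ≤ k → (bitsB n).toList.length ≤ n.toNat := by
  induction k with
  | zero =>
    intro n hk
    rw [bitsB]
    by_cases h : n ≤ 0
    · simp [h]
    · omega
  | succ k ih =>
    intro n hk
    rw [bitsB]
    by_cases h : n ≤ 0
    · simp [h]
    · simp only [h, if_false, String.toList_append, List.length_append]
      have hm : (n >>> (1:Nat)).toNat ≤ k := by rw [pvShiftr_toNat]; omega
      have := ih (n >>> (1:Nat)) hm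
      rw [PySem.Int.band_one, pvDigit_len]
      rw [pvShiftr_toNat] at this
      omega

theorem pvBits_len_pos (n : Int) (h : 1 ≤ n) : 1 ≤ (bitsB n).toList.length := by
  rw [bitsB]
  have h0 : ¬ n ≤ 0 := by omega
  simp only [h0, if_false, String.toList_append, List.length_append]
  rw [PySem.Int.band_one, pvDigit_len]
  omega

-- _prefix(length): '' if length <= 0 else _prefix(len(code)-1) + code where code = '0' + _bits(length)[1:]
def prefixB (length : Int) : String :=
  if length ≤ 0 then ""
  else
    let code := "0" ++ PySem.Str.slice (bitsB length) (some 1) none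
    prefixB (PySem.Str.len code - 1) ++ code
termination_by length.toNat
decreasing_by
  have hle := pvBits_len_le length.toNat length le_rfl
  have hpos := pvBits_len_pos length (by omega)
  rw [PySem.Str.len_append, PySem.Str.len_eq, PySem.Str.len_eq, PySem.Str.toList_slice]
  simp only [PySem.Chars.slice_eq_listSlice, PySem.List.slice_from_one]
  have h0 : ("0" : String).toList.length = 1 := by decide
  rw [h0, List.length_tail]
  omega

def elias_alt (num : Int) : String :=
  let binary := bitsB num
  prefixB (PySem.Str.len binary - 1) ++ binary

-- ===== PRECONDITION & SPEC =====
def Spec_elias (num : Int) (out : String) : Prop := out = elias_alt num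
instance (num : Int) (out : String) : Decidable (Spec_elias num out) := by unfold Spec_elias; infer_instance

-- ===== CLAIM (what is proved, stated in full; the proofs are below) =====
def Claim_equal_elias : Prop := ∀ (num : Int), Dom_elias num → Spec_elias num (elias num)

-- ===== LEMMAS AND PROOFS =====
-- A's num>0 collection loop builds exactly B's recursive binary expansion (in front of the accumulator)
theorem pvLoopFalse_eq (k : Nat) : ∀ (n : Int) (acc : String), n.toNat ≤ k →
    (ntbLoopFalse n acc).toList = (bitsB n).toList ++ acc.toList := by
  induction k with
  | zero =>
    intro n acc hk
    rw [ntbLoopFalse, bitsB]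
    have h0 : ¬ 0 < n := by omega
    have h1 : n ≤ 0 := by omega
    simp [h0, h1]
  | succ k ih =>
    intro n acc hk
    rw [ntbLoopFalse, bitsB]
    by_cases h : 0 < n
    · have h1 : ¬ n ≤ 0 := by omega
      have hm : (n >>> (1:Nat)).toNat ≤ k := by rw [pvShiftr_toNat]; omega
      rw [if_pos h, if_neg h1, ih (n >>> (1:Nat)) _ hm]
      rw [PySem.Int.band_one]
      simp [String.toList_append]
    · have h1 : n ≤ 0 := by omega
      simp [h, h1]

theorem pvBits_zero : bitsB 0 = "" := by rw [bitsB]; norm_num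

theorem pvBits_one : bitsB 1 = "1" := by
  have e1 : ((1:Int) >>> (1:Nat)) = 0 := by decide
  rw [bitsB, if_neg (by norm_num : ¬ (1:Int) ≤ 0), e1, pvBits_zero]
  apply String.toList_inj.mp
  rw [String.toList_append]
  decide

-- A's num>1 collection loop builds B's binary expansion without its leading bit
theorem pvLoopTrue_eq (k : Nat) : ∀ (n : Int) (acc : String), n.toNat ≤ k → 1 ≤ n →
    (ntbLoopTrue n acc).toList = (bitsB n).toList.tail ++ acc.toList := by
  induction k with
  | zero => intro n acc hk h1; omega
  | succ k ih =>
    intro n acc hk h1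
    rw [ntbLoopTrue]
    by_cases h : 1 < n
    · have hs1 : 1 ≤ n >>> (1:Nat) := by
        have := pvShiftr_toNat n; omega
      have hm : (n >>> (1:Nat)).toNat ≤ k := by rw [pvShiftr_toNat]; omega
      rw [if_pos h, ih (n >>> (1:Nat)) _ hm hs1]
      conv_rhs => rw [bitsB]
      have h1' : ¬ n ≤ 0 := by omega
      rw [if_neg h1', String.toList_append, PySem.Int.band_one]
      have hne : (bitsB (n >>> (1:Nat))).toList ≠ [] := by
        have := pvBits_len_pos (n >>> (1:Nat)) hs1
        intro hc; rw [hc] at this; simp at this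
      rw [String.toList_append, List.tail_append_of_ne_nil hne, List.append_assoc]
    · have hn1 : n = 1 := by omega
      subst hn1
      rw [if_neg h, pvBits_one]
      have : ("1" : String).toList = ['1'] := by decide
      rw [this]
      rfl

-- the length-code A glues on each round is exactly B's 'code'
theorem pvTmp_eq_code (n : Int) (h : 1 ≤ n) :
    numToBitsStr n true 0 = "0" ++ PySem.Str.slice (bitsB n) (some 1) none := by
  apply String.toList_inj.mp
  rw [numToBitsStr, if_pos rfl]
  rw [String.toList_append, String.toList_append]
  rw [pvLoopTrue_eq n.toNat n "" le_rfl h]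
  rw [PySem.Str.toList_slice]
  simp [PySem.Chars.slice_eq_listSlice, PySem.List.slice_from_one]

-- A's cascade loop equals B's recursive prefix chain (in front of the accumulator)
theorem pvEliasLoop_eq (k : Nat) : ∀ (len : Int) (acc : String), len.toNat ≤ k →
    (eliasLoop len acc).toList = (prefixB len).toList ++ acc.toList := by
  induction k with
  | zero =>
    intro len acc hk
    rw [eliasLoop, prefixB]
    have h0 : ¬ 0 < len := by omega
    have h1 : len ≤ 0 := by omega
    simp [h0, h1]
  | succ k ih =>
    intro len acc hk
    rw [eliasLoop, prefixB]
    by_cases h : 0 < len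
    · have h1 : ¬ len ≤ 0 := by omega
      rw [if_pos h, if_neg h1]
      have hcode := pvTmp_eq_code len (by omega)
      have hm : (PySem.Str.len (numToBitsStr len true 0) - 1).toNat ≤ k := by
        have := pvTmp_len_bounds len (by omega)
        rw [PySem.Str.len_eq]
        omega
      rw [ih _ _ hm]
      rw [← hcode, String.toList_append, String.toList_append, List.append_assoc]
    · have h1 : len ≤ 0 := by omega
      simp [h, h1]

-- ===== VERDICT (by name: the statement is the Claim_ definition above) =====
theorem elias_spec : Claim_equal_elias := by
  intro num _
  unfold Spec_elias
  apply String.toList_inj.mp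
  rw [elias, elias_alt]
  have hA : numToBitsStr num false 0 = bitsB num := by
    apply String.toList_inj.mp
    rw [numToBitsStr]
    simp only [Bool.false_eq_true, if_false]
    rw [if_neg (by omega : ¬ (0:Int) < 0)]
    rw [pvLoopFalse_eq num.toNat num "" le_rfl]
    simp
  rw [hA]
  rw [pvEliasLoop_eq (PySem.Str.len (bitsB num) - 1).toNat _ _ le_rfl]
  rw [String.toList_append]
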